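-- pv_equiv track=rewrite | github.com/JiHyeongSeo/jhseo-plugin | plugins/session-manager/session_manager.py | group_by_project
-- ===== SOURCE A (Python) =====
-- def group_by_project(sessions: list[dict]) -> dict[str, list[dict]]:
--     groups: dict[str, list[dict]] = {}
--     for s in sessions:
--         key = s.get("projectPath", "unknown")
--         groups.setdefault(key, []).append(s)
--     for key in groups:
--         groups[key].sort(key=lambda x: x.get("modified", ""), reverse=True)
--     return dict(sorted(groups.items()))
-- ===== SOURCE B (Python) =====
-- def group_by_project(sessions: list[dict]) -> dict[str, list[dict]]:
--     keys = sorted({s.get("projectPath", "unknown") for s in sessions})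
--     return {
--         k: sorted(
--             (s for s in sessions if s.get("projectPath", "unknown") == k),
--             key=lambda x: x.get("modified", ""),
--             reverse=True,
--         )
--         for k in keys
--     }
-- ===== Notes on version B (the rewrite author's own statement) =====
-- stated objective: simpler
-- what changed: A accumulates groups incrementally in a dict (setdefault/append), then sorts each group in place and finally rebuilds a dict from sorted items; B instead computes the sorted set of distinct project keys once and builds the result directly as a comprehension, selecting and sorting each group by a per-key filter pass, with no mutable dict at all.
import Mathlib
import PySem

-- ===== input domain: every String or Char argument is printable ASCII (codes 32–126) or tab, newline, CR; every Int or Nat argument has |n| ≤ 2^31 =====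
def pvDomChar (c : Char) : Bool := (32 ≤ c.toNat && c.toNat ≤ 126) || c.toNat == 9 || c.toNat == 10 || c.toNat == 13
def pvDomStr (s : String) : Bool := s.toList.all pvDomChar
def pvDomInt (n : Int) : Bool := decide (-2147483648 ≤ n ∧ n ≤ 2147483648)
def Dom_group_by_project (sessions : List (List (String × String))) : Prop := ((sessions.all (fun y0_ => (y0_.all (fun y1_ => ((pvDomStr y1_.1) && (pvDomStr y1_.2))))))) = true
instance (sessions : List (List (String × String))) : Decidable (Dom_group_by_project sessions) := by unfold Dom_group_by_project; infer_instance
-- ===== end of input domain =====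

-- B replaces A's incremental dict grouping (hash-accumulate, per-group sort, final dict(sorted(...)))
-- by sorted distinct keys + one filtered-and-sorted comprehension per key (objective: simpler; not faster).

-- shared helper: s.get(k, dflt) on a session dict (association list, first match)
def pvGet (s : List (String × String)) (k dflt : String) : String :=
  (PySem.Dict.mk s).getD k dflt

def pvKey (s : List (String × String)) : String := pvGet s "projectPath" "unknown"

def pvMod (s : List (String × String)) : String := pvGet s "modified" ""

-- ===== PORT A =====
def group_by_project (sessions : List (List (String × String))) : List (String × List (List (String × String))) :=
  let groups : PySem.Dict String (List (List (String × String))) :=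
    sessions.foldl (fun d s => d.modify (pvKey s) [] (fun g => g ++ [s])) PySem.Dict.empty
  let groups2 : PySem.Dict String (List (List (String × String))) :=
    groups.keys.foldl (fun d k => d.modify k [] (fun g => PySem.List.sorted g pvMod true)) groups
  -- dict keys are distinct, so Python's tuple comparison in sorted(groups.items()) only ever
  -- compares the keys — ported exactly as a sort with key (·.1)
  (PySem.Dict.ofList (PySem.List.sorted groups2.items (fun p => p.1))).items

-- ===== PORT B =====
def group_by_project_alt (sessions : List (List (String × String))) : List (String × List (List (String × String))) :=
  let keys := PySem.List.sorted (PySem.Set.ofList (sessions.map pvKey)) (fun k => k)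
  keys.map (fun k =>
    (k, PySem.List.sorted (sessions.filter (fun s => pvKey s == k)) pvMod true))

-- ===== PRECONDITION & SPEC =====
def Spec_group_by_project (sessions : List (List (String × String))) (out : List (String × List (List (String × String)))) : Prop := out = group_by_project_alt sessions
instance (sessions : List (List (String × String))) (out : List (String × List (List (String × String)))) : Decidable (Spec_group_by_project sessions out) := by unfold Spec_group_by_project; infer_instance

-- ===== CLAIM (what is proved, stated in full; the proofs are below) =====
def Claim_equal_group_by_project : Prop := ∀ (sessions : List (List (String × String))), Dom_group_by_project sessions → Spec_group_by_project sessions (group_by_project sessions)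

-- ===== LEMMAS AND PROOFS =====

-- A's grouping loop, named for the proofs
def foldA (sessions : List (List (String × String))) : PySem.Dict String (List (List (String × String))) :=
  sessions.foldl (fun d s => d.modify (pvKey s) [] (fun g => g ++ [s])) PySem.Dict.empty

-- A's per-group sorting loop, named for the proofs
def foldB (sessions : List (List (String × String))) : PySem.Dict String (List (List (String × String))) :=
  (foldA sessions).keys.foldl
    (fun d k => d.modify k [] (fun g => PySem.List.sorted g pvMod true)) (foldA sessions)

theorem group_by_project_def (sessions : List (List (String × String))) :
    group_by_project sessions
      = (PySem.Dict.ofList (PySem.List.sorted (foldB sessions).items (fun p => p.1))).items := rfl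

theorem foldA_getD (sessions : List (List (String × String))) (c : String) :
    (foldA sessions).getD c [] = sessions.filter (fun s => pvKey s == c) := by
  have e : foldA sessions
      = (sessions.map (fun s => (pvKey s, s))).foldl
          (fun d p => d.modify p.1 [] (fun g => g ++ [p.2])) PySem.Dict.empty := by
    rw [List.foldl_map]; rfl
  rw [e, PySem.Dict.getD_foldl_modify_append]
  simp [List.filter_map, Function.comp_def]

theorem foldA_keys (sessions : List (List (String × String))) :
    (foldA sessions).keys = PySem.Set.ofList (sessions.map pvKey) := by
  have h := PySem.Dict.keys_foldl_modify_key sessions pvKey []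
    (fun _ s => (fun g => g ++ [s])) PySem.Dict.empty
  simpa [PySem.Dict.keys_empty] using h

theorem foldA_nodup (sessions : List (List (String × String))) : (foldA sessions).keys.Nodup := by
  exact PySem.Dict.nodup_keys_foldl_modify_key sessions pvKey []
    (fun _ s => (fun g => g ++ [s])) PySem.Dict.empty (by simp)

theorem set_update_self {α : Type} [BEq α] [LawfulBEq α] (l s : List α) (h : ∀ x ∈ l, x ∈ s) :
    PySem.Set.update s l = s := by
  induction l generalizing s with
  | nil => rfl
  | cons x l ih =>
    have hx : PySem.Set.contains s x = true := by
      have := h x (by simp)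
      simpa [PySem.Set.contains] using this
    show PySem.Set.update (PySem.Set.add s x) l = s
    rw [PySem.Set.add, if_pos hx]
    exact ih s (fun y hy => h y (by simp [hy]))

theorem foldB_keys (sessions : List (List (String × String))) :
    (foldB sessions).keys = (foldA sessions).keys := by
  have h := PySem.Dict.keys_foldl_modify_key (foldA sessions).keys (fun k => k) []
    (fun _ _ => (fun g => PySem.List.sorted g pvMod true)) (foldA sessions)
  rw [List.map_id'] at h
  rw [show foldB sessions = (foldA sessions).keys.foldl
        (fun d k => d.modify k [] (fun g => PySem.List.sorted g pvMod true)) (foldA sessions) from rfl]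
  rw [h]
  exact set_update_self _ _ (fun x hx => hx)

theorem getD_foldl_modify_all {ν : Type} (g : ν → ν) (d0 : ν) (ks : List String)
    (d : PySem.Dict String ν) (hnd : ks.Nodup) (c : String) :
    (ks.foldl (fun d k => d.modify k d0 g) d).getD c d0
      = if c ∈ ks then g (d.getD c d0) else d.getD c d0 := by
  induction ks generalizing d with
  | nil => simp
  | cons k ks ih =>
    rw [List.foldl_cons, ih _ hnd.of_cons]
    rw [PySem.Dict.getD_modify]
    by_cases hck : c = k
    · subst hck
      have hcn : c ∉ ks := (List.nodup_cons.mp hnd).1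
      simp [hcn]
    · by_cases hmem : c ∈ ks <;> simp [hck, hmem]

theorem foldB_items (sessions : List (List (String × String))) :
    (foldB sessions).items
      = (PySem.Set.ofList (sessions.map pvKey)).map (fun k =>
          (k, PySem.List.sorted (sessions.filter (fun s => pvKey s == k)) pvMod true)) := by
  have hnd2 : (foldB sessions).keys.Nodup := by
    rw [foldB_keys]; exact foldA_nodup sessions
  rw [PySem.Dict.items_eq_map_keys (foldB sessions) hnd2 [], foldB_keys, foldA_keys]
  apply List.map_congr_left
  intro k hk
  have hgd : (foldB sessions).getD k []
      = PySem.List.sorted ((foldA sessions).getD k []) pvMod true := by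
    have h := getD_foldl_modify_all (fun g => PySem.List.sorted g pvMod true) []
      (foldA sessions).keys (foldA sessions) (foldA_nodup sessions) k
    rw [show foldB sessions = (foldA sessions).keys.foldl
        (fun d k => d.modify k [] (fun g => PySem.List.sorted g pvMod true)) (foldA sessions) from rfl]
    rw [h, if_pos (by rw [foldA_keys]; exact hk)]
  rw [hgd, foldA_getD]

theorem items_ofList_of_nodup {ν : Type} (l : List (String × ν)) (h : (l.map (fun p => p.1)).Nodup) :
    (PySem.Dict.ofList l).items = l := by
  have h2 := PySem.Dict.items_foldl_insert_fresh l (fun p => p.1) (fun p => p.2)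
    PySem.Dict.empty (fun a _ => by simp) h
  simpa using h2

theorem group_by_project_eq (sessions : List (List (String × String))) :
    group_by_project sessions = group_by_project_alt sessions := by
  have hpw := PySem.List.sorted_ofList_pairwise_lt (sessions.map pvKey)
  have hsort : PySem.List.sorted (foldB sessions).items (fun p => p.1)
      = group_by_project_alt sessions := by
    apply PySem.List.sorted_eq_of_perm_of_pairwise_lt
    · rw [foldB_items]
      exact (PySem.List.sorted_perm (PySem.Set.ofList (sessions.map pvKey)) (fun k => k) false).map _
    · exact hpw.map _ (fun a b hab => hab)
  rw [group_by_project_def, hsort]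
  apply items_ofList_of_nodup
  have : (group_by_project_alt sessions).map (fun p => p.1)
      = PySem.List.sorted (PySem.Set.ofList (sessions.map pvKey)) (fun k => k) := by
    unfold group_by_project_alt
    simp [Function.comp_def]
  rw [this]
  exact hpw.imp (fun hab => ne_of_lt hab)

-- ===== VERDICT (by name: the statement is the Claim_ definition above) =====
theorem group_by_project_spec : Claim_equal_group_by_project := by
  intro sessions _
  unfold Spec_group_by_project
  exact group_by_project_eq sessions
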